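-- pv_equiv track=rewrite | github.com/Wislan-Pablo/resumopro.com.br | main.py | _try_format_with_words
-- ===== SOURCE A (Python) =====
-- def _try_format_with_words(table_lines: list) -> list:
--     """Tenta formatar dividindo por palavras."""
--     formatted_lines = []
--
--     for i, line in enumerate(table_lines):
--         words = line.split()
--         if len(words) >= 2:
--             formatted_line = "| " + " | ".join(words) + " |"
--             formatted_lines.append(formatted_line)
--
--             if i == 0:
--                 separator = "|" + "---|" * len(words)
--                 formatted_lines.append(separator)
--         else:
--             return None  # Falhou
--
--     return formatted_lines
-- ===== SOURCE B (Python) =====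
-- def _try_format_with_words(table_lines: list) -> list:
--     """Tenta formatar dividindo por palavras."""
--     rows = [line.split() for line in table_lines]
--     if any(len(ws) < 2 for ws in rows):
--         return None  # Falhou
--     out = ["| " + " | ".join(ws) + " |" for ws in rows]
--     if out:
--         out.insert(1, "|" + "---|" * len(rows[0]))
--     return out
-- ===== Notes on version B (the rewrite author's own statement) =====
-- stated objective: simpler
-- what changed: Replaces A's single stateful loop (early return, i==0 separator branch inside the loop) with validate-all-splits first, then a comprehension formatting every row, then one insert of the separator at index 1.
import Mathlib
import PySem

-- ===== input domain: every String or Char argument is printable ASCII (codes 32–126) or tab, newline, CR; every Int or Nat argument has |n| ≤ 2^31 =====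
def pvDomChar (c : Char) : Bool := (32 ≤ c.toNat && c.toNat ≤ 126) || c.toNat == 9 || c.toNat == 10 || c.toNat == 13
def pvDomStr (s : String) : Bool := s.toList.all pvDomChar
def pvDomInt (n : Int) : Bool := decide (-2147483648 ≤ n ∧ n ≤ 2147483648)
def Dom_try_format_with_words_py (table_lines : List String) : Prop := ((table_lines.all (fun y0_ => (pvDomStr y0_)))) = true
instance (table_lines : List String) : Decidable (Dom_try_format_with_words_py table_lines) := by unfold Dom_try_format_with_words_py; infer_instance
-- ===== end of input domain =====

-- B replaces A's single stateful loop (early return + i==0 branch) with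
-- validate-then-format: map split, check all rows, format every row, insert the
-- separator once at index 1 (objective: simpler; same return value everywhere).

-- ===== PORT A =====
-- the 'for i, line in enumerate(table_lines)' loop, carrying i and formatted_lines
def pvALoop (lines : List String) (i : Nat) (acc : List String) : Option (List String) :=
  match lines with
  | [] => some acc
  | line :: rest =>
    let words := PySem.Str.split₀ line
    if 2 ≤ words.length then
      let formatted_line := "| " ++ PySem.Str.join " | " words ++ " |"
      let acc1 := acc ++ [formatted_line]
      -- '"---|" * len(words)' ported as joining len(words) copies
      let acc2 := if i = 0 then acc1 ++ ["|" ++ String.join (List.replicate words.length "---|")] else acc1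
      pvALoop rest (i + 1) acc2
    else none

def try_format_with_words_py (table_lines : List String) : Option (List String) :=
  pvALoop table_lines 0 []

-- ===== PORT B =====
def try_format_with_words_py_alt (table_lines : List String) : Option (List String) :=
  let rows := table_lines.map PySem.Str.split₀
  if rows.any (fun ws => decide (ws.length < 2)) then none
  else
    let out := rows.map (fun ws => "| " ++ PySem.Str.join " | " ws ++ " |")
    -- 'if out: out.insert(1, sep)' — out is empty iff rows is empty
    match rows with
    | [] => some out
    | r0 :: _ => some (PySem.List.insert out 1 ("|" ++ String.join (List.replicate r0.length "---|")))

-- ===== PRECONDITION & SPEC =====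
def Spec_try_format_with_words_py (table_lines : List String) (out : Option (List String)) : Prop := out = try_format_with_words_py_alt table_lines
instance (table_lines : List String) (out : Option (List String)) : Decidable (Spec_try_format_with_words_py table_lines out) := by unfold Spec_try_format_with_words_py; infer_instance

-- ===== CLAIM (what is proved, stated in full; the proofs are below) =====
def Claim_equal_try_format_with_words_py : Prop := ∀ (table_lines : List String), Dom_try_format_with_words_py table_lines → Spec_try_format_with_words_py table_lines (try_format_with_words_py table_lines)

-- ===== LEMMAS AND PROOFS =====
-- After the first iteration (i ≠ 0) A's loop is: fail on any short row, else append every formatted row.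
theorem pvALoop_tail (lines : List String) : ∀ (i : Nat) (acc : List String), i ≠ 0 →
    pvALoop lines i acc =
      if (lines.map PySem.Str.split₀).any (fun ws => decide (ws.length < 2)) then none
      else some (acc ++ (lines.map PySem.Str.split₀).map (fun ws => "| " ++ PySem.Str.join " | " ws ++ " |")) := by
  induction lines with
  | nil => intro i acc _; simp [pvALoop]
  | cons l rest ih =>
    intro i acc hi
    simp only [pvALoop, List.map_cons, List.any_cons]
    by_cases h : 2 ≤ (PySem.Str.split₀ l).length
    · have h2 : ¬ (PySem.Str.split₀ l).length < 2 := by omega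
      simp only [h, if_pos, hi, ih (i + 1) _ (by omega)]
      simp [h2, List.append_assoc]
    · have h2 : (PySem.Str.split₀ l).length < 2 := by omega
      simp [h, h2]

theorem try_format_with_words_py_spec : Claim_equal_try_format_with_words_py := by
  intro table_lines _
  unfold Spec_try_format_with_words_py try_format_with_words_py try_format_with_words_py_alt
  cases table_lines with
  | nil => simp [pvALoop]
  | cons l rest =>
    simp only [pvALoop, List.map_cons, List.any_cons]
    by_cases h : 2 ≤ (PySem.Str.split₀ l).length
    · have h2 : ¬ (PySem.Str.split₀ l).length < 2 := by omega
      simp only [h, if_pos, pvALoop_tail rest 1 _ (by omega)]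
      rw [PySem.List.insert_ofNat _ 1 _ (by simp)]
      simp [h2]
    · have h2 : (PySem.Str.split₀ l).length < 2 := by omega
      simp [h, h2]
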